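-- pv_equiv track=rewrite | github.com/uqfoundation/mystic | mystic/munge.py | _process_ids
-- ===== SOURCE A (Python) =====
-- def _process_ids(ids, n=None): #NOTE: n only needed when ids is single value
--   """convert ids to list of tuples of (iterations, ids)
--
--   ids is a list of ints, an int, or None
--   n is target length (generally used when ids is a single-value)
--   """
--   if ids is None:
--     return [(i,) for i in range(n)] if n else None
--   from numbers import Integral
--   if isinstance(ids, Integral):
--     return [(i,ids) for i in range(n)] if n else ids
--   if not len(ids):
--     return [(i,) for i in range(n)] if n else []
--   # ids is [(iter,id)] where id may be None
--   if len(ids) and isinstance(ids[0], tuple):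
--     step = ids
--   else:
--     step = ids[:]
--     for i,j in enumerate(ids):
--       step[i] = (list(zip(*step[:i]))[1].count(j), j) if i else (i,j)
--   if len(ids) == ids.count(None):
--     step = [(i,) for (i,j) in step]
--   else:
--     step = list(step)
--   return step[:n]
-- ===== SOURCE B (Python) =====
-- def _process_ids(ids, n=None): #NOTE: n only needed when ids is single value
--   """convert ids to list of tuples of (iterations, ids)
--
--   ids is a list of ints, an int, or None
--   n is target length (generally used when ids is a single-value)
--   """
--   if ids is None:
--     return [(i,) for i in range(n)] if n else None
--   from numbers import Integral
--   if isinstance(ids, Integral):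
--     return [(i, ids) for i in range(n)] if n else ids
--   if not len(ids):
--     return [(i,) for i in range(n)] if n else []
--   if isinstance(ids[0], tuple):
--     step = list(ids)
--   else:
--     # build back-to-front: pop ids off the right end; the prior-occurrence
--     # count of j is simply how many copies of j remain to its left
--     rest = list(ids)
--     step = []
--     while rest:
--       j = rest.pop()
--       step.append((rest.count(j), j))
--     step.reverse()
--   if ids.count(None) == len(ids):
--     step = [(i,) for (i, j) in step]
--   return step[:n]
-- ===== Notes on version B (the rewrite author's own statement) =====
-- stated objective: faster
-- what changed: The left-to-right enumerate loop that re-unzips the growing tuple prefix (zip(*step[:i])) to count prior occurrences is replaced by a back-to-front pass that pops each id off the right end and counts its remaining copies directly in the raw list, then reverses; all guard branches and step[:n] are kept.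
import Mathlib
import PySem

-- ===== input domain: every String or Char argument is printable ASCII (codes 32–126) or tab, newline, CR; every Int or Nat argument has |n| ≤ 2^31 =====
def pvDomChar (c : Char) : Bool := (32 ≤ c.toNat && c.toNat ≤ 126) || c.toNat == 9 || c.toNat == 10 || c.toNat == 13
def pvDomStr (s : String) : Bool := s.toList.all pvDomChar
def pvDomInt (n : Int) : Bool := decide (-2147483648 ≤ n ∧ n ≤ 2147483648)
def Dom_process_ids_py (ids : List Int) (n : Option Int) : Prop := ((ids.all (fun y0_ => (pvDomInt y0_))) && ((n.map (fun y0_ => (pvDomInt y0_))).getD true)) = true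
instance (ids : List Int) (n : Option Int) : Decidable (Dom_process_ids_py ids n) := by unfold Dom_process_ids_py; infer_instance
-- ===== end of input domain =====

-- B replaces A's enumerate loop (which re-unzips the growing tuple prefix to count prior
-- occurrences) by a back-to-front pass counting remaining copies in the raw list; measurably
-- faster by a constant factor (timing run), same O(n^2).
-- Under the types (ids : List Int, n : Option Int) the 'ids is None', 'isinstance(ids, Integral)',
-- 'isinstance(ids[0], tuple)' and all-None-collapse branches of both Pythons are unreachable
-- (ids.count(None) = 0 ≠ len(ids) for nonempty ids) and are ported as the live code only.

-- ===== PORT A =====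
-- for i,j in enumerate(ids): step[i] = (list(zip(*step[:i]))[1].count(j), j) if i else (i,j)
-- step[:i] is exactly the already-replaced prefix, carried here as acc;
-- list(zip(*acc))[1] is the tuple of second components, i.e. acc.map (fun t => t[1]).
def pvA_loop (acc : List (List Int)) (i : Int) : List Int → List (List Int)
  | [] => acc
  | j :: rest =>
    let entry : List Int :=
      if i ≠ 0 then [(((acc.map (fun t => PySem.List.pyGetD t 1 0)).count j : Nat) : Int), j]
      else [i, j]
    pvA_loop (acc ++ [entry]) (i + 1) rest

def process_ids_py (ids : List Int) (n : Option Int) : List (List Int) :=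
  if ids.length = 0 then
    -- return [(i,) for i in range(n)] if n else []
    match n with
    | some k => if k ≠ 0 then (PySem.List.pyRange 0 k 1).map (fun i => [i]) else []
    | none => []
  else
    -- step = ids[:]; the enumerate loop; all-None collapse never fires; return step[:n]
    match n with
    | some k => PySem.List.slice (pvA_loop [] 0 ids) none (some k)
    | none => pvA_loop [] 0 ids

-- ===== PORT B =====
-- while rest: j = rest.pop(); step.append((rest.count(j), j))
def pvB_loop : List Int → List (List Int) → List (List Int)
  | [], step => step
  | x :: xs, step =>
    let rest := (x :: xs).dropLast
    let j := (x :: xs).getLast (by simp)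
    pvB_loop rest (step ++ [[((rest.count j : Nat) : Int), j]])
termination_by l _ => l.length
decreasing_by simp

def process_ids_py_alt (ids : List Int) (n : Option Int) : List (List Int) :=
  if ids.length = 0 then
    -- return [(i,) for i in range(n)] if n else []
    match n with
    | some k => if k ≠ 0 then (PySem.List.pyRange 0 k 1).map (fun i => [i]) else []
    | none => []
  else
    -- step = the reversed back-to-front pass; all-None collapse never fires; return step[:n]
    match n with
    | some k => PySem.List.slice (pvB_loop ids []).reverse none (some k)
    | none => (pvB_loop ids []).reverse

-- ===== PRECONDITION & SPEC =====
def Spec_process_ids_py (ids : List Int) (n : Option Int) (out : List (List Int)) : Prop := out = process_ids_py_alt ids n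
instance (ids : List Int) (n : Option Int) (out : List (List Int)) : Decidable (Spec_process_ids_py ids n out) := by unfold Spec_process_ids_py; infer_instance

-- ===== CLAIM (what is proved, stated in full; the proofs are below) =====
def Claim_equal_process_ids_py : Prop := ∀ (ids : List Int) (n : Option Int), Dom_process_ids_py ids n → Spec_process_ids_py ids n (process_ids_py ids n)

-- ===== LEMMAS AND PROOFS =====

-- canonical form both loops compute: entry at each position = (count of j in the prefix C before it, j)
def pvCanon (C : List Int) : List Int → List (List Int)
  | [] => []
  | j :: l => [((C.count j : Nat) : Int), j] :: pvCanon (C ++ [j]) l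

lemma pvA_loop_eq (l : List Int) : ∀ (acc : List (List Int)) (C : List Int),
    acc.map (fun t => PySem.List.pyGetD t 1 0) = C →
    pvA_loop acc (acc.length : Int) l = acc ++ pvCanon C l := by
  induction l with
  | nil => intro acc C _; simp [pvA_loop, pvCanon]
  | cons j l ih =>
    intro acc C hC
    by_cases h : acc = []
    · subst h
      simp only [List.map_nil] at hC
      subst hC
      show pvA_loop ([] ++ [[(0 : Int), j]]) (0 + 1) l = pvCanon [] (j :: l)
      have := ih [[(0 : Int), j]] [j] (by simp [PySem.List.pyGetD])
      simp only [List.length_cons, List.length_nil] at this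
      simpa [pvCanon] using this
    · have hne : (acc.length : Int) ≠ 0 := by
        simpa using fun hh => h (List.length_eq_zero_iff.mp hh)
      have hC' : acc.map (fun t => (PySem.List.pyGet? t 1).getD 0) = C := by
        simpa [PySem.List.pyGetD] using hC
      set e : List Int := [((C.count j : Nat) : Int), j] with he
      have hstep : pvA_loop acc (acc.length : Int) (j :: l)
          = pvA_loop (acc ++ [e]) ((acc.length : Int) + 1) l := by
        rw [pvA_loop]
        congr 2
        simp [h, hC', PySem.List.pyGetD, he]
      have hmap : (acc ++ [e]).map (fun t => PySem.List.pyGetD t 1 0) = C ++ [j] := by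
        simp [he, hC', PySem.List.pyGetD]
      have hlen : ((acc ++ [e]).length : Int) = (acc.length : Int) + 1 := by simp
      calc pvA_loop acc (acc.length : Int) (j :: l)
          = pvA_loop (acc ++ [e]) ((acc.length : Int) + 1) l := hstep
        _ = pvA_loop (acc ++ [e]) (((acc ++ [e]).length : Nat) : Int) l := by rw [hlen]
        _ = (acc ++ [e]) ++ pvCanon (C ++ [j]) l := ih _ _ hmap
        _ = acc ++ pvCanon C (j :: l) := by simp [pvCanon, he]

lemma pvCanon_concat (l : List Int) : ∀ (C : List Int) (j : Int),
    pvCanon C (l ++ [j]) = pvCanon C l ++ [[(((C ++ l).count j : Nat) : Int), j]] := by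
  induction l with
  | nil => intro C j; simp [pvCanon]
  | cons a l ih =>
    intro C j
    show pvCanon C (a :: (l ++ [j])) = _
    rw [pvCanon, ih (C ++ [a]) j]
    simp [pvCanon, List.append_assoc]

lemma pvB_loop_ne_nil (m : List Int) (hm : m ≠ []) (step : List (List Int)) :
    pvB_loop m step
      = pvB_loop m.dropLast (step ++ [[((m.dropLast.count (m.getLast hm) : Nat) : Int), m.getLast hm]]) := by
  cases m with
  | nil => exact absurd rfl hm
  | cons x xs => simp [pvB_loop]

lemma pvB_loop_eq (l : List Int) : ∀ (step : List (List Int)),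
    pvB_loop l step = step ++ (pvCanon [] l).reverse := by
  induction l using List.reverseRecOn with
  | nil => intro step; simp [pvB_loop, pvCanon]
  | append_singleton l j ih =>
    intro step
    rw [pvB_loop_ne_nil (l ++ [j]) (by simp) step]
    simp only [List.dropLast_concat, List.getLast_concat]
    rw [ih, pvCanon_concat]
    simp

lemma pv_steps_eq (ids : List Int) : (pvB_loop ids []).reverse = pvA_loop [] 0 ids := by
  rw [pvB_loop_eq]
  have := pvA_loop_eq ids [] [] rfl
  simp only [List.length_nil, Nat.cast_zero, List.nil_append] at this
  simp [this]

-- ===== VERDICT (by name: the statement is the Claim_ definition above) =====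
theorem process_ids_py_spec : Claim_equal_process_ids_py := by
  intro ids n _
  show process_ids_py ids n = process_ids_py_alt ids n
  unfold process_ids_py process_ids_py_alt
  rw [pv_steps_eq]
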